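-- pv_equiv track=rewrite | github.com/coderextreme/X3DJSONLD | gltf/x3d_to_gltf_advanced_binary.py | triangulate_indices
-- ===== SOURCE A (Python) =====
-- def triangulate_indices(x3d_indices):
--     triangles, poly = [], []
--     for idx in x3d_indices:
--         if idx == -1:
--             for i in range(1, len(poly) - 1):
--                 triangles.extend([poly[0], poly[i], poly[i+1]])
--             poly = []
--         else:
--             poly.append(idx)
--     if len(poly) >= 3:
--         for i in range(1, len(poly) - 1):
--             triangles.extend([poly[0], poly[i], poly[i+1]])
--     return triangles
-- ===== SOURCE B (Python) =====
-- def triangulate_indices(x3d_indices):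
--     # scan for the next -1 sentinel with list.index, slice the polygon out,
--     # and fan-triangulate it via zip of adjacent pairs
--     out = []
--     start = 0
--     n = len(x3d_indices)
--     while start <= n:
--         try:
--             k = x3d_indices.index(-1, start)
--         except ValueError:
--             k = n
--         poly = x3d_indices[start:k]
--         for b, c in zip(poly[1:], poly[2:]):
--             out += [poly[0], b, c]
--         start = k + 1
--     return out
-- ===== Notes on version B (the rewrite author's own statement) =====
-- stated objective: alternative
-- what changed: B replaces A's element-by-element foldl accumulation by a sentinel scan: it repeatedly finds the next -1 with list.index(-1, start), slices the polygon out, and fan-triangulates it via zip of adjacent pairs, so no per-element polygon accumulator is maintained.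
import Mathlib
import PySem

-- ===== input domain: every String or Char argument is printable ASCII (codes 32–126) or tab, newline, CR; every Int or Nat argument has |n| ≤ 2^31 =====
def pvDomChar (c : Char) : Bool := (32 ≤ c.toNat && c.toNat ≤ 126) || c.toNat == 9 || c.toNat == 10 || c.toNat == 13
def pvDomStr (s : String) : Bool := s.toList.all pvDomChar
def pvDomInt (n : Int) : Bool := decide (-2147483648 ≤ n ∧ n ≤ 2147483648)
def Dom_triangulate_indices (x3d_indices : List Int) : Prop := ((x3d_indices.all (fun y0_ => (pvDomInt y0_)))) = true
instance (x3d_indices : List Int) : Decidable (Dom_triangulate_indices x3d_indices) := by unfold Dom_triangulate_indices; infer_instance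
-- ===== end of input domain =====

-- B replaces A's element-by-element accumulation by a sentinel scan: it finds the next -1
-- with list.index, slices the polygon out, and fan-triangulates it via zip of adjacent pairs
-- (objective: alternative; same return value).

-- ===== PORT A =====
-- 'for i in range(1, len(poly)-1): triangles.extend([poly[0], poly[i], poly[i+1]])'
def pvFanA (triangles poly : List Int) : List Int :=
  (PySem.List.pyRange 1 ((poly.length : Int) - 1) 1).foldl
    (fun acc i => acc ++ [PySem.List.pyGetD poly 0 0, PySem.List.pyGetD poly i 0,
                          PySem.List.pyGetD poly (i + 1) 0]) triangles

def triangulate_indices (x3d_indices : List Int) : List Int :=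
  let s := x3d_indices.foldl
    (fun (s : List Int × List Int) idx =>
      if idx = -1 then (pvFanA s.1 s.2, [])
      else (s.1, s.2 ++ [idx])) ([], [])
  if 3 ≤ s.2.length then pvFanA s.1 s.2 else s.1

-- ===== PORT B =====
-- the while loop of Source B: 'while start <= n: k = index of next -1 (or n); poly = xs[start:k];
-- for b, c in zip(poly[1:], poly[2:]): out += [poly[0], b, c]; start = k + 1'.
-- 'x3d_indices.index(-1, start)' (ValueError → n) is the index? search on the suffix from start;
-- the slice xs[start:k] with 0 ≤ start ≤ k is exactly take (k - start) (drop start).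
def pvAltLoop (xs : List Int) (out : List Int) (start : Nat) : List Int :=
  if h : start ≤ xs.length then
    let k : Nat := match PySem.List.index? (xs.drop start) (-1) with
      | some j => start + j
      | none => xs.length
    let poly := (xs.drop start).take (k - start)
    pvAltLoop xs
      (((poly.drop 1).zip (poly.drop 2)).foldl
        (fun o bc => o ++ [PySem.List.pyGetD poly 0 0, bc.1, bc.2]) out)
      (k + 1)
  else out
termination_by xs.length + 1 - start
decreasing_by
  cases hidx : PySem.List.index? (xs.drop start) (-1) with
  | some j => simp only []; omega
  | none => simp only []; omega

def triangulate_indices_alt (x3d_indices : List Int) : List Int :=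
  pvAltLoop x3d_indices [] 0

-- ===== PRECONDITION & SPEC =====
def Spec_triangulate_indices (x3d_indices : List Int) (out : List Int) : Prop := out = triangulate_indices_alt x3d_indices
instance (x3d_indices : List Int) (out : List Int) : Decidable (Spec_triangulate_indices x3d_indices out) := by unfold Spec_triangulate_indices; infer_instance

-- ===== CLAIM (what is proved, stated in full; the proofs are below) =====
def Claim_equal_triangulate_indices : Prop := ∀ (x3d_indices : List Int), Dom_triangulate_indices x3d_indices → Spec_triangulate_indices x3d_indices (triangulate_indices x3d_indices)

-- ===== LEMMAS AND PROOFS =====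

-- fan emission of one polygon, in zip form (proof-side normal form)
def pvFan (poly : List Int) : List Int :=
  ((poly.drop 1).zip (poly.drop 2)).flatMap
    (fun bc => [PySem.List.pyGetD poly 0 0, bc.1, bc.2])

-- split at -1 sentinels, including the trailing (possibly empty) polygon
def pvSplit : List Int → List (List Int)
  | [] => [[]]
  | x :: rest =>
    if x = -1 then [] :: pvSplit rest
    else match pvSplit rest with
      | p :: ps => (x :: p) :: ps
      | [] => [[x]]

theorem pvSplit_ne_nil (xs : List Int) : pvSplit xs ≠ [] := by
  cases xs with
  | nil => simp [pvSplit]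
  | cons x rest =>
    simp only [pvSplit]
    split_ifs
    · simp
    · cases pvSplit rest <;> simp

theorem pvFan_short (poly : List Int) (h : poly.length < 3) : pvFan poly = [] := by
  have hd : poly.drop 2 = [] := List.drop_eq_nil_of_le (by omega)
  simp [pvFan, hd]

-- fan over a tail via Nat indexing equals fan via zip of adjacent pairs
theorem pv_core (rest : List Int) (a : Int) :
    (List.range (rest.length - 1)).flatMap
      (fun j => [a, rest.getD j 0, rest.getD (j + 1) 0])
      = (rest.zip (rest.drop 1)).flatMap (fun bc => [a, bc.1, bc.2]) := by
  induction rest generalizing a with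
  | nil => simp
  | cons b t ih =>
    cases t with
    | nil => simp
    | cons c u =>
      have h1 : (b :: c :: u).length - 1 = ((c :: u).length - 1) + 1 := by simp
      rw [h1, List.range_succ_eq_map]
      simp only [List.flatMap_cons, List.flatMap_map, List.getD_cons_zero,
        List.getD_cons_succ] at ih ⊢
      rw [ih a]
      simp

theorem pvFanA_eq (triangles poly : List Int) :
    pvFanA triangles poly = triangles ++ pvFan poly := by
  cases poly with
  | nil =>
      rw [pvFanA, PySem.List.pyRange_one_eq_nil (by simp)]
      simp [pvFan]
  | cons a rest =>
      rw [pvFanA, PySem.List.foldl_append_eq_flatMap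
        (g := fun i => [PySem.List.pyGetD (a :: rest) 0 0,
          PySem.List.pyGetD (a :: rest) i 0, PySem.List.pyGetD (a :: rest) (i + 1) 0]),
        PySem.List.pyRange_one, List.flatMap_map]
      have hn : (((a :: rest).length : Int) - 1 - 1).toNat = rest.length - 1 := by
        simp
      rw [hn]
      have hfun : ∀ j : Nat,
          [PySem.List.pyGetD (a :: rest) 0 0,
           PySem.List.pyGetD (a :: rest) (1 + (j : Int)) 0,
           PySem.List.pyGetD (a :: rest) (1 + (j : Int) + 1) 0]
          = [a, rest.getD j 0, rest.getD (j + 1) 0] := by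
        intro j
        rw [PySem.List.pyGetD_of_nonneg (i := 1 + (j : Int)) _ _ (by omega),
            PySem.List.pyGetD_of_nonneg (i := 1 + (j : Int) + 1) _ _ (by omega),
            show (1 + (j : Int)).toNat = j + 1 by omega,
            show (1 + (j : Int) + 1).toNat = j + 2 by omega]
        simp
      rw [List.flatMap_congr (h := fun j _ => hfun j), pv_core, pvFan]
      simp

-- combine the pending partial polygon p with the first block of a split
def pvComb (p : List Int) : List (List Int) → List Int
  | q :: qs => pvFan (p ++ q) ++ qs.flatMap pvFan
  | [] => pvFan p

-- A's interleaved loop, characterised through pvSplit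
theorem pvA_loop (xs : List Int) : ∀ (t p : List Int),
    (let s := xs.foldl
        (fun (s : List Int × List Int) idx =>
          if idx = -1 then (pvFanA s.1 s.2, [])
          else (s.1, s.2 ++ [idx])) (t, p)
     if 3 ≤ s.2.length then pvFanA s.1 s.2 else s.1)
      = t ++ pvComb p (pvSplit xs) := by
  induction xs with
  | nil =>
    intro t p
    simp only [List.foldl_nil, pvSplit, pvComb, List.flatMap_nil, List.append_nil]
    by_cases h : 3 ≤ p.length
    · rw [if_pos h, pvFanA_eq]
    · rw [if_neg h, pvFan_short p (by omega)]
      simp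
  | cons x rest ih =>
    intro t p
    by_cases h : x = -1
    · simp only [List.foldl_cons, h, if_pos, pvSplit]
      rw [ih (pvFanA t p) [], pvFanA_eq]
      simp only [pvComb, List.append_nil]
      cases hs : pvSplit rest with
      | nil => exact absurd hs (pvSplit_ne_nil rest)
      | cons q qs => simp
    · simp only [List.foldl_cons, if_neg h]
      rw [ih t (p ++ [x])]
      simp only [pvSplit, if_neg h]
      cases hs : pvSplit rest with
      | nil => exact absurd hs (pvSplit_ne_nil rest)
      | cons q qs => simp [pvComb]

-- index? characterisations of pvSplit
theorem pvSplit_no_sentinel (d : List Int) (h : PySem.List.index? d (-1) = none) :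
    pvSplit d = [d] := by
  induction d with
  | nil => rfl
  | cons x rest ih =>
    rw [PySem.List.index?_eq_idxOf?] at h ih
    simp only [List.idxOf?_cons] at h
    by_cases hx : x = -1
    · simp [hx] at h
    · have hx' : (x == -1) = false := by simp [hx]
      rw [hx'] at h
      simp only [Bool.false_eq_true, if_false, Option.map_eq_none_iff] at h
      rw [pvSplit, if_neg hx, ih h]

theorem pvSplit_sentinel (d : List Int) : ∀ (j : Nat),
    PySem.List.index? d (-1) = some j →
    j < d.length ∧ pvSplit d = d.take j :: pvSplit (d.drop (j + 1)) := by
  induction d with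
  | nil => intro j h; rw [PySem.List.index?_eq_idxOf?] at h; simp at h
  | cons x rest ih =>
    intro j h
    rw [PySem.List.index?_eq_idxOf?] at h
    simp only [List.idxOf?_cons] at h
    by_cases hx : x = -1
    · have hx' : (x == -1) = true := by simp [hx]
      rw [hx'] at h
      simp only [if_true, Option.some.injEq] at h
      subst h
      simp [pvSplit, hx]
    · have hx' : (x == -1) = false := by simp [hx]
      rw [hx'] at h
      simp only [Bool.false_eq_true, if_false] at h
      cases hr : List.idxOf? (-1) rest with
      | none => rw [hr] at h; simp at h
      | some j' =>
        rw [hr] at h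
        simp only [Option.map_some, Option.some.injEq] at h
        obtain ⟨hj, hsp⟩ := ih j' (by rw [PySem.List.index?_eq_idxOf?]; exact hr)
        subst h
        constructor
        · simp; omega
        · rw [pvSplit, if_neg hx, hsp]
          simp

-- one zip-fan fold step starting from 'out' is 'out ++ pvFan poly'
theorem pvFanFold_eq (out poly : List Int) :
    ((poly.drop 1).zip (poly.drop 2)).foldl
        (fun o bc => o ++ [PySem.List.pyGetD poly 0 0, bc.1, bc.2]) out
      = out ++ pvFan poly := by
  rw [pvFan, PySem.List.foldl_append_eq_flatMap
    (g := fun bc : Int × Int => [PySem.List.pyGetD poly 0 0, bc.1, bc.2])]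

-- B's scanning loop, characterised through pvSplit
theorem pvB_loop (xs : List Int) (out : List Int) (start : Nat) (h : start ≤ xs.length) :
    pvAltLoop xs out start = out ++ (pvSplit (xs.drop start)).flatMap pvFan := by
  rw [pvAltLoop, dif_pos h]
  cases hidx : PySem.List.index? (xs.drop start) (-1) with
  | none =>
    simp only []
    have hpoly : (xs.drop start).take (xs.length - start) = xs.drop start := by
      apply List.take_of_length_le; simp
    rw [hpoly, pvFanFold_eq, pvAltLoop, dif_neg (by omega),
        pvSplit_no_sentinel _ hidx]
    simp
  | some j =>
    simp only []
    obtain ⟨hj, hsp⟩ := pvSplit_sentinel (xs.drop start) j hidx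
    have hjlen : j < xs.length - start := by simpa using hj
    have hpoly : (xs.drop start).take (start + j - start) = (xs.drop start).take j := by
      congr 1; omega
    rw [hpoly, pvFanFold_eq,
        pvB_loop xs _ (start + j + 1) (by omega), hsp]
    have hdd : xs.drop (start + j + 1) = (xs.drop start).drop (j + 1) := by
      rw [List.drop_drop]; congr 1
    rw [hdd]
    simp
termination_by xs.length + 1 - start
decreasing_by omega

-- ===== VERDICT (by name: the statement is the Claim_ definition above) =====
theorem triangulate_indices_spec : Claim_equal_triangulate_indices := by
  intro xs _
  unfold Spec_triangulate_indices triangulate_indices triangulate_indices_alt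
  rw [pvA_loop xs [] [], pvB_loop xs [] 0 (by omega)]
  simp only [List.drop_zero, List.nil_append]
  cases hs : pvSplit xs with
  | nil => exact absurd hs (pvSplit_ne_nil xs)
  | cons q qs => simp [pvComb]
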